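-- pv_equiv track=rewrite | github.com/adarshalexbalmuchu/GIS | urban-hydrology-engine/backend/scripts/import_delhi_wards.py | _derive_zone
-- ===== SOURCE A (Python) =====
-- def _derive_zone(ward_no: str | None, ward_name: str) -> str:
--     """Best-effort zone from ward number prefix or name keywords."""
--     if not ward_no:
--         ward_no = ""
--     wno_upper = ward_no.upper()
--
--     if wno_upper.startswith("NDMC"):
--         return "New Delhi"
--     if wno_upper.startswith("CANT"):
--         return "Cantonment"
--
--     # Try extracting numeric part for MCD wards
--     digits = "".join(c for c in ward_no if c.isdigit())
--     if digits:
--         n = int(digits)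
--         if n <= 58:
--             return "South Delhi"
--         if n <= 104:
--             return "North Delhi"
--         if n <= 150:
--             return "East Delhi"
--         if n <= 200:
--             return "West Delhi"
--         if n <= 250:
--             return "Central Delhi"
--         return "Outer Delhi"
--
--     # Fallback based on keywords in ward name
--     name_up = ward_name.upper()
--     for zone_kw, zone_lbl in [
--         ("SOUTH", "South Delhi"), ("NORTH", "North Delhi"),
--         ("EAST", "East Delhi"), ("WEST", "West Delhi"),
--         ("CENTRAL", "Central Delhi"), ("NEW DELHI", "New Delhi"),
--     ]:
--         if zone_kw in name_up:
--             return zone_lbl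
--
--     return "Delhi"
-- ===== SOURCE B (Python) =====
-- _BOUNDS = [58, 104, 150, 200, 250]
-- _NUM_ZONES = ["South Delhi", "North Delhi", "East Delhi", "West Delhi",
--               "Central Delhi", "Outer Delhi"]
-- _KEYWORDS = [("SOUTH", "South Delhi"), ("NORTH", "North Delhi"),
--              ("EAST", "East Delhi"), ("WEST", "West Delhi"),
--              ("CENTRAL", "Central Delhi"), ("NEW DELHI", "New Delhi")]
--
--
-- def _bisect_left(a, x):
--     lo, hi = 0, len(a)
--     while lo < hi:
--         mid = (lo + hi) // 2
--         if a[mid] < x: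
--             lo = mid + 1
--         else:
--             hi = mid
--     return lo
--
--
-- def _derive_zone(ward_no: str | None, ward_name: str) -> str:
--     """Zone from ward number prefix or name keywords, via a boundary table."""
--     wno = ward_no or ""
--     wno_upper = wno.upper()
--     if wno_upper.startswith("NDMC"):
--         return "New Delhi"
--     if wno_upper.startswith("CANT"):
--         return "Cantonment"
--     digits = [c for c in wno if c.isdigit()]
--     if digits:
--         return _NUM_ZONES[_bisect_left(_BOUNDS, int("".join(digits)))]
--     name_up = ward_name.upper()
--     return next((lbl for kw, lbl in _KEYWORDS if kw in name_up), "Delhi")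
-- ===== Notes on version B (the rewrite author's own statement) =====
-- stated objective: idiomatic
-- what changed: The six-way numeric if-cascade becomes a binary search over a sorted boundary table [58,104,150,200,250] indexing a label list, and the keyword fallback loop becomes a first-match scan expressed with next() over a generator.
import Mathlib
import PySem

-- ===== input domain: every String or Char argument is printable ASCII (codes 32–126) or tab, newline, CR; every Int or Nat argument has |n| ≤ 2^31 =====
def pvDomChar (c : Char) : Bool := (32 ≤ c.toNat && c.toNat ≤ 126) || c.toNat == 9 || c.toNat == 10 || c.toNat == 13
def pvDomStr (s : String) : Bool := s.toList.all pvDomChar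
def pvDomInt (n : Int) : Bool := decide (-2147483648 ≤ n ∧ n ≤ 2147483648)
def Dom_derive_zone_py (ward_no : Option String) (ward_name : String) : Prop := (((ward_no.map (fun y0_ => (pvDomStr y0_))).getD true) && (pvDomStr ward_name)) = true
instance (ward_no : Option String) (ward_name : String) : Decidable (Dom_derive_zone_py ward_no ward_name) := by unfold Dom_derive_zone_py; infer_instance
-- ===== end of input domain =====

-- B replaces A's six-way numeric if-cascade by a hand-written binary search over a sorted
-- boundary table indexing a label list, and A's keyword fallback loop by a first-match find.

-- ===== PORT A =====
-- A's keyword fallback loop, as structural recursion over the literal pair list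
def kwLoopA (name_up : String) : List (String × String) → String
  | [] => "Delhi"
  | (kw, lbl) :: rest => if PySem.Str.isIn kw name_up then lbl else kwLoopA name_up rest

def derive_zone_py (ward_no : Option String) (ward_name : String) : String :=
  let wn : String := ward_no.getD ""          -- if not ward_no: ward_no = ""  (None and "" both become "")
  let wno_upper := PySem.Str.upper wn
  if PySem.Str.startswith wno_upper "NDMC" then "New Delhi"
  else if PySem.Str.startswith wno_upper "CANT" then "Cantonment"
  else
    let digits : String := String.ofList (wn.toList.filter PySem.Chars.isdigit)
    if digits ≠ "" then
      let n : Int := (PySem.Int.ofStr? digits).getD 0   -- int(digits); digits is nonempty all-digit, so never none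
      if n ≤ 58 then "South Delhi"
      else if n ≤ 104 then "North Delhi"
      else if n ≤ 150 then "East Delhi"
      else if n ≤ 200 then "West Delhi"
      else if n ≤ 250 then "Central Delhi"
      else "Outer Delhi"
    else
      kwLoopA (PySem.Str.upper ward_name)
        [("SOUTH", "South Delhi"), ("NORTH", "North Delhi"),
         ("EAST", "East Delhi"), ("WEST", "West Delhi"),
         ("CENTRAL", "Central Delhi"), ("NEW DELHI", "New Delhi")]

-- ===== PORT B =====
-- Source B's hand-written _bisect_left(a, x): the lo/hi while-loop as recursion on hi - lo
def bisectLeftB (a : List Int) (x : Int) (lo hi : Nat) : Nat :=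
  if lo < hi then
    let mid := (lo + hi) / 2
    if a.getD mid 0 < x then bisectLeftB a x (mid + 1) hi else bisectLeftB a x lo mid
  else lo
termination_by hi - lo
decreasing_by all_goals omega

def pvBounds : List Int := [58, 104, 150, 200, 250]
def pvNumZones : List String :=
  ["South Delhi", "North Delhi", "East Delhi", "West Delhi", "Central Delhi", "Outer Delhi"]
def pvKeywords : List (String × String) :=
  [("SOUTH", "South Delhi"), ("NORTH", "North Delhi"),
   ("EAST", "East Delhi"), ("WEST", "West Delhi"),
   ("CENTRAL", "Central Delhi"), ("NEW DELHI", "New Delhi")]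

def derive_zone_py_alt (ward_no : Option String) (ward_name : String) : String :=
  let wn : String := ward_no.getD ""          -- wno = ward_no or ""
  let wno_upper := PySem.Str.upper wn
  if PySem.Str.startswith wno_upper "NDMC" then "New Delhi"
  else if PySem.Str.startswith wno_upper "CANT" then "Cantonment"
  else
    let digits : List Char := wn.toList.filter PySem.Chars.isdigit
    if digits ≠ [] then
      let n : Int := (PySem.Int.ofStr? (String.ofList digits)).getD 0  -- int("".join(digits)); never none
      pvNumZones.getD (bisectLeftB pvBounds n 0 pvBounds.length) ""
    else
      let name_up := PySem.Str.upper ward_name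
      ((pvKeywords.find? (fun p => PySem.Str.isIn p.1 name_up)).map Prod.snd).getD "Delhi"

-- ===== PRECONDITION & SPEC =====
def Spec_derive_zone_py (ward_no : Option String) (ward_name : String) (out : String) : Prop := out = derive_zone_py_alt ward_no ward_name
instance (ward_no : Option String) (ward_name : String) (out : String) : Decidable (Spec_derive_zone_py ward_no ward_name out) := by unfold Spec_derive_zone_py; infer_instance

-- ===== CLAIM (what is proved, stated in full; the proofs are below) =====
def Claim_equal_derive_zone_py : Prop := ∀ (ward_no : Option String) (ward_name : String), Dom_derive_zone_py ward_no ward_name → Spec_derive_zone_py ward_no ward_name (derive_zone_py ward_no ward_name)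

-- ===== LEMMAS AND PROOFS =====
-- evaluation of Source B's binary search on the 5-element boundary table, for every integer n
theorem bisect_val (n : Int) :
    bisectLeftB pvBounds n 0 5 =
      (if n ≤ 58 then 0 else if n ≤ 104 then 1 else if n ≤ 150 then 2
       else if n ≤ 200 then 3 else if n ≤ 250 then 4 else 5) := by
  by_cases h1 : n ≤ 58 <;> by_cases h2 : n ≤ 104 <;> by_cases h3 : n ≤ 150 <;>
    by_cases h4 : n ≤ 200 <;> by_cases h5 : n ≤ 250 <;>
    first
      | omega
      | (simp [bisectLeftB, pvBounds, h1, h2, h3, h4, h5,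
          show (58 < n) ↔ ¬ (n ≤ 58) by omega, show (104 < n) ↔ ¬ (n ≤ 104) by omega,
          show (150 < n) ↔ ¬ (n ≤ 150) by omega, show (200 < n) ↔ ¬ (n ≤ 200) by omega,
          show (250 < n) ↔ ¬ (n ≤ 250) by omega])

-- the label-table lookup equals A's cascade, for every integer n
theorem table_eq_cascade (n : Int) :
    pvNumZones.getD (bisectLeftB pvBounds n 0 pvBounds.length) "" =
      (if n ≤ 58 then "South Delhi"
       else if n ≤ 104 then "North Delhi"
       else if n ≤ 150 then "East Delhi"
       else if n ≤ 200 then "West Delhi"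
       else if n ≤ 250 then "Central Delhi"
       else "Outer Delhi") := by
  have h5 : pvBounds.length = 5 := rfl
  rw [h5, bisect_val]
  split_ifs <;> rfl

-- A's fallback loop is first-match find over the same list
theorem kwLoopA_eq_find (name_up : String) (l : List (String × String)) :
    kwLoopA name_up l = ((l.find? (fun p => PySem.Str.isIn p.1 name_up)).map Prod.snd).getD "Delhi" := by
  induction l with
  | nil => rfl
  | cons p rest ih =>
      obtain ⟨kw, lbl⟩ := p
      simp only [kwLoopA]
      cases h : PySem.Chars.isIn kw.toList name_up.toList <;>
        simp [h, ih]

-- a nonempty char list makes a nonempty string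
theorem ofList_ne_empty (l : List Char) (h : l ≠ []) : String.ofList l ≠ "" := by
  intro hc; apply h; simpa using congrArg String.toList hc

-- ===== VERDICT (by name: the statement is the Claim_ definition above) =====
theorem derive_zone_py_spec : Claim_equal_derive_zone_py := by
  intro ward_no ward_name _
  show derive_zone_py ward_no ward_name = derive_zone_py_alt ward_no ward_name
  simp only [derive_zone_py, derive_zone_py_alt]
  by_cases h1 : PySem.Str.startswith (PySem.Str.upper (ward_no.getD "")) "NDMC" = true <;>
    simp only [if_pos, h1, if_false, Bool.false_eq_true]
  by_cases h2 : PySem.Str.startswith (PySem.Str.upper (ward_no.getD "")) "CANT" = true <;>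
    simp only [if_pos, h2, if_false, Bool.false_eq_true]
  by_cases hd : (ward_no.getD "").toList.filter PySem.Chars.isdigit = []
  · rw [if_neg (fun hne => hne (by rw [hd]))]
    rw [if_neg (fun hne => hne hd)]
    exact kwLoopA_eq_find (PySem.Str.upper ward_name) pvKeywords
  · rw [if_pos (ofList_ne_empty _ hd), if_pos hd]
    exact (table_eq_cascade _).symm
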